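-- pv_equiv track=rewrite | github.com/reallaksh19/PCF_GLB_Viewer_Conv | viewer/converters/scripts/inputxml_to_cii.py | _index_sections
-- ===== SOURCE A (Python) =====
-- def _safe_text(value: str | None) -> str:
--     if value is None:
--         return ""
--     return value.strip()
--
-- def _index_sections(lines: list[str]) -> dict[str, tuple[int, int]]:
--     header_positions: list[tuple[str, int]] = []
--     for index, line in enumerate(lines):
--         if not line.startswith("#$"):
--             continue
--         name = _safe_text(line[2:])
--         if not name:
--             continue
--         header_positions.append((name, index))
--
--     sections: dict[str, tuple[int, int]] = {}
--     for position, (name, header_index) in enumerate(header_positions):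
--         next_header_index = (
--             header_positions[position + 1][1] if position + 1 < len(header_positions) else len(lines)
--         )
--         sections[name] = (header_index + 1, next_header_index)
--     return sections
-- ===== SOURCE B (Python) =====
-- def _index_sections(lines: list[str]) -> dict[str, tuple[int, int]]:
--     # One streaming pass: close the previous section when the next header is seen.
--     sections: dict[str, tuple[int, int]] = {}
--     prev_name = None
--     prev_start = 0
--     for index, line in enumerate(lines):
--         if not line.startswith("#$"):
--             continue
--         name = line[2:].strip()
--         if not name:
--             continue
--         if prev_name is not None:
--             sections[prev_name] = (prev_start, index)
--         prev_name = name
--         prev_start = index + 1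
--     if prev_name is not None:
--         sections[prev_name] = (prev_start, len(lines))
--     return sections
-- ===== Notes on version B (the rewrite author's own statement) =====
-- stated objective: simpler
-- what changed: Replaces A's two passes (build the full header_positions list, then index each section with a lookahead into that list) by a single streaming pass that keeps only the previous header's name and start and closes each section when the next header (or the end) is reached.
import Mathlib
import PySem

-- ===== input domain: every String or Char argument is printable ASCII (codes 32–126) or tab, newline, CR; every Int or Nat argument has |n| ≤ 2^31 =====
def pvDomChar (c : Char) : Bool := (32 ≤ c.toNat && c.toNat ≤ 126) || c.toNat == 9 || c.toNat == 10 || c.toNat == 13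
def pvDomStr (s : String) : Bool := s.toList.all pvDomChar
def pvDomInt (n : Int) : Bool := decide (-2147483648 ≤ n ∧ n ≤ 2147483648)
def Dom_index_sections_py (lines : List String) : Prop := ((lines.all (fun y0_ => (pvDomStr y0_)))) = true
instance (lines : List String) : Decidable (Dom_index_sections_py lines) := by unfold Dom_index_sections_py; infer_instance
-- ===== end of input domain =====

-- B replaces A's two passes (collect all header positions, then index with lookahead) by one
-- streaming pass that closes the previous section when the next header is seen (objective: simpler).

-- ===== PORT A =====
def pvSafeText (value : Option String) : String :=
  match value with
  | none => ""
  | some v => PySem.Str.strip v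

def index_sections_py (lines : List String) : List (String × Int × Int) :=
  let headerPositions : List (String × Int) :=
    (PySem.List.enumerate lines).foldl (fun acc p =>
      if !(PySem.Str.startswith p.2 "#$") then acc
      else
        let name := pvSafeText (some (PySem.Str.slice p.2 (some 2) none))
        if name = "" then acc
        else acc ++ [(name, p.1)]) []
  let sections : PySem.Dict String (Int × Int) :=
    (PySem.List.enumerate headerPositions).foldl (fun d q =>
      let nextHeaderIndex : Int :=
        if q.1 + 1 < (headerPositions.length : Int) then
          (PySem.List.pyGetD headerPositions (q.1 + 1) ("", 0)).2
        else (lines.length : Int)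
      d.insert q.2.1 (q.2.2 + 1, nextHeaderIndex)) PySem.Dict.empty
  sections.items

-- ===== PORT B =====
-- the body of B's for-loop, one step of the stream
def pvStepB (st : PySem.Dict String (Int × Int) × Option (String × Int)) (p : Int × String) :
    PySem.Dict String (Int × Int) × Option (String × Int) :=
  if !(PySem.Str.startswith p.2 "#$") then st
  else
    let name := PySem.Str.strip (PySem.Str.slice p.2 (some 2) none)
    if name = "" then st
    else
      let d := match st.2 with
        | none => st.1
        | some (n, s) => st.1.insert n (s, p.1)
      (d, some (name, p.1 + 1))

-- B's trailing "if prev_name is not None: sections[prev_name] = (prev_start, len(lines))"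
def pvClose (L : Int) (st : PySem.Dict String (Int × Int) × Option (String × Int)) :
    PySem.Dict String (Int × Int) :=
  match st.2 with
  | none => st.1
  | some (n, s) => st.1.insert n (s, L)

def index_sections_py_alt (lines : List String) : List (String × Int × Int) :=
  let st := (PySem.List.enumerate lines).foldl pvStepB (PySem.Dict.empty, none)
  (pvClose (lines.length : Int) st).items

-- ===== PRECONDITION & SPEC =====
def Spec_index_sections_py (lines : List String) (out : List (String × Int × Int)) : Prop := out = index_sections_py_alt lines
instance (lines : List String) (out : List (String × Int × Int)) : Decidable (Spec_index_sections_py lines out) := by unfold Spec_index_sections_py; infer_instance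

-- ===== CLAIM (what is proved, stated in full; the proofs are below) =====
def Claim_equal_index_sections_py : Prop := ∀ (lines : List String), Dom_index_sections_py lines → Spec_index_sections_py lines (index_sections_py lines)

-- ===== LEMMAS AND PROOFS =====

-- the common "is a header with a non-empty name" test and the header name
def pvCond (l : String) : Bool :=
  PySem.Str.startswith l "#$" && !(PySem.Str.strip (PySem.Str.slice l (some 2) none) == "")

def pvName (l : String) : String := PySem.Str.strip (PySem.Str.slice l (some 2) none)

-- the list of (name, line index) of all headers, structurally
def pvHdr : List String → Int → List (String × Int)
  | [], _ => []
  | l :: ls, i => if pvCond l then (pvName l, i) :: pvHdr ls (i + 1) else pvHdr ls (i + 1)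

-- build the sections dict from the header list, closing each section at the next header
def pvFill (L : Int) (d : PySem.Dict String (Int × Int)) :
    List (String × Int) → PySem.Dict String (Int × Int)
  | [] => d
  | [(n, i)] => d.insert n (i + 1, L)
  | (n, i) :: (m, j) :: rest => pvFill L (d.insert n (i + 1, j)) ((m, j) :: rest)

lemma hdrA_spec (ls : List String) : ∀ (i : Int) (acc : List (String × Int)),
    (PySem.List.enumerate ls i).foldl (fun acc p =>
      if !(PySem.Str.startswith p.2 "#$") then acc
      else
        let name := pvSafeText (some (PySem.Str.slice p.2 (some 2) none))
        if name = "" then acc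
        else acc ++ [(name, p.1)]) acc = acc ++ pvHdr ls i := by
  induction ls with
  | nil => intro i acc; simp [PySem.List.enumerate_nil, pvHdr]
  | cons l ls ih =>
    intro i acc
    rw [PySem.List.enumerate_cons, List.foldl_cons]
    by_cases hs : PySem.Str.startswith l "#$" = true
    · by_cases hn : pvName l = ""
      · have hc : pvCond l = false := by
          simp [pvCond, pvName] at hn ⊢; intro _; exact hn
        have hname : pvSafeText (some (PySem.Str.slice l (some 2) none)) = "" := hn
        simp only [hs, Bool.not_true, Bool.false_eq_true, if_false, hname, ite_true]
        rw [ih, pvHdr]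
        simp [hc]
      · have hc : pvCond l = true := by simp [pvCond, pvName] at hn ⊢; exact ⟨hs, hn⟩
        have : pvSafeText (some (PySem.Str.slice l (some 2) none)) = pvName l := rfl
        simp only [hs, Bool.not_true, Bool.false_eq_true, if_false, this, hn]
        rw [ih, pvHdr]
        simp [hc, pvName]
    · have hc : pvCond l = false := by simp [pvCond]; intro h; exact absurd h hs
      simp only [Bool.not_eq_true] at hs
      simp only [hs, Bool.not_false, if_true]
      rw [ih, pvHdr]
      simp [hc]

lemma fillA_spec (L : Int) (H : List (String × Int)) :
    ∀ (n k : Nat) (d : PySem.Dict String (Int × Int)), H.length ≤ k + n →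
    (PySem.List.enumerate (H.drop k) (k : Int)).foldl (fun d q =>
      let nextHeaderIndex : Int :=
        if q.1 + 1 < (H.length : Int) then
          (PySem.List.pyGetD H (q.1 + 1) ("", 0)).2
        else L
      d.insert q.2.1 (q.2.2 + 1, nextHeaderIndex)) d = pvFill L d (H.drop k) := by
  intro n
  induction n with
  | zero =>
    intro k d hk
    rw [List.drop_eq_nil_of_le (by omega)]
    simp [PySem.List.enumerate_nil, pvFill]
  | succ n ih =>
    intro k d hk
    by_cases hlt : k < H.length
    · rw [List.drop_eq_getElem_cons hlt, PySem.List.enumerate_cons, List.foldl_cons]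
      by_cases h2 : k + 1 < H.length
      · have hget : PySem.List.pyGetD H ((k : Int) + 1) ("", 0) = H[k + 1] := by
          have : ((k : Int) + 1) = ((k + 1 : Nat) : Int) := by push_cast; ring
          rw [this, PySem.List.pyGetD_natCast, List.getD_eq_getElem _ _ h2]
        have hcond : ((k : Int) + 1 < (H.length : Int)) = True := by
          simp; exact_mod_cast h2
        rw [List.drop_eq_getElem_cons h2]
        simp only [hcond, if_true, hget]
        rw [pvFill, ← List.drop_eq_getElem_cons h2]
        have : ((k : Int) + 1) = (((k + 1 : Nat)) : Int) := by push_cast; ring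
        rw [this, ih (k + 1) _ (by omega)]
      · have hcond : ¬ ((k : Int) + 1 < (H.length : Int)) := by
          intro h; exact h2 (by exact_mod_cast h)
        have hnil : H.drop (k + 1) = [] := List.drop_eq_nil_of_le (by omega)
        simp only [hcond, if_false, hnil]
        rw [PySem.List.enumerate_nil]
        simp [pvFill]
    · rw [List.drop_eq_nil_of_le (by omega)]
      simp [PySem.List.enumerate_nil, pvFill]

-- the pending section as a header entry (its start is header index + 1)
def pvPrev : Option (String × Int) → List (String × Int)
  | none => []
  | some (n, s) => [(n, s - 1)]

lemma goB_spec (L : Int) (ls : List String) : ∀ (i : Int)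
    (d : PySem.Dict String (Int × Int)) (p : Option (String × Int)),
    pvClose L ((PySem.List.enumerate ls i).foldl pvStepB (d, p))
    = pvFill L d (pvPrev p ++ pvHdr ls i) := by
  induction ls with
  | nil =>
    intro i d p
    rw [PySem.List.enumerate_nil]
    cases p with
    | none => simp [pvClose, pvPrev, pvHdr, pvFill]
    | some q =>
      obtain ⟨n, s⟩ := q
      simp [pvClose, pvPrev, pvHdr, pvFill, sub_add_cancel]
  | cons l ls ih =>
    intro i d p
    rw [PySem.List.enumerate_cons, List.foldl_cons]
    by_cases hs : PySem.Str.startswith l "#$" = true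
    · by_cases hn : pvName l = ""
      · have hc : pvCond l = false := by
          simp [pvCond, pvName] at hn ⊢; intro _; exact hn
        simp only [pvStepB, hs, Bool.not_true, Bool.false_eq_true, if_false,
          show PySem.Str.strip (PySem.Str.slice l (some 2) none) = "" from hn, ite_true]
        rw [ih, pvHdr]
        simp [hc]
      · have hc : pvCond l = true := by simp [pvCond, pvName] at hn ⊢; exact ⟨hs, hn⟩
        simp only [pvStepB, hs, Bool.not_true, Bool.false_eq_true, if_false]
        rw [if_neg (by exact hn)]
        cases p with
        | none =>
          rw [ih, pvHdr]
          simp [pvPrev, hc, pvName, add_sub_cancel_right]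
        | some q =>
          obtain ⟨n, s⟩ := q
          rw [ih, pvHdr]
          simp only [hc, if_true, pvPrev, List.cons_append, List.nil_append, pvFill,
            add_sub_cancel_right, sub_add_cancel, pvName]
    · have hc : pvCond l = false := by simp [pvCond]; intro h; exact absurd h hs
      simp only [Bool.not_eq_true] at hs
      simp only [pvStepB, hs, Bool.not_false, if_true]
      rw [ih, pvHdr]
      simp [hc]

-- ===== VERDICT (by name: the statement is the Claim_ definition above) =====
theorem index_sections_py_spec : Claim_equal_index_sections_py := by
  intro lines _
  unfold Spec_index_sections_py
  simp only [index_sections_py, index_sections_py_alt]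
  rw [hdrA_spec lines 0 []]
  rw [goB_spec (lines.length : Int) lines 0 PySem.Dict.empty none]
  simp only [List.nil_append]
  have := fillA_spec (lines.length : Int) (pvHdr lines 0) (pvHdr lines 0).length 0
    PySem.Dict.empty (by omega)
  simp only [List.drop_zero, Nat.cast_zero] at this
  rw [this, pvPrev]
  simp
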